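-- pv_equiv track=rewrite | github.com/rjazevedo/transparencia | FolhaPagamento/converteCSV.py | SeparaCampos
-- ===== SOURCE A (Python) =====
-- def SeparaCampos(s):
--     # Os campos estão separados por muitos espaços. Precisamos trocar estas
--     # cadeias de espaços por uma vírgula. As linhas já terminam com \n
--
--     resposta = ''
--     estado = 0
--     for letra in s:
--         if estado == 0:
--             if letra != ' ': # está no meio de uma string
--                 resposta += letra
--             elif letra == ' ': # não sei se é separador de palavras ou não
--                 estado = 1
--         elif estado == 1:
--             if letra != ' ': # foi espaço separador de palavras
--                 resposta += ' ' + letra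
--                 estado = 0
--             elif letra == ' ': # sequencia de espaços
--                 resposta += ','
--                 estado = 2
--         elif estado == 2:
--             if letra != ' ': # terminou a sequencia de espaços
--                 resposta += letra
--                 estado = 0
--     return resposta
-- ===== SOURCE B (Python) =====
-- def SeparaCampos(s):
--     # Split on runs of 2+ spaces, join with commas, then drop a dangling
--     # trailing single space (A's state machine never emits it).
--     parts = []
--     cur = []
--     i = 0
--     n = len(s)
--     while i < n:
--         if s[i] == ' ' and i + 1 < n and s[i + 1] == ' ':
--             parts.append(''.join(cur))
--             cur = []
--             while i < n and s[i] == ' ':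
--                 i += 1
--         else:
--             cur.append(s[i])
--             i += 1
--     parts.append(''.join(cur))
--     t = ','.join(parts)
--     return t[:-1] if t.endswith(' ') else t
-- ===== Notes on version B (the rewrite author's own statement) =====
-- stated objective: simpler
-- what changed: Replaces the explicit 3-state character state machine by a tokenizer that splits on runs of two or more spaces, joins the tokens with commas, and trims one dangling trailing space.
import Mathlib
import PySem

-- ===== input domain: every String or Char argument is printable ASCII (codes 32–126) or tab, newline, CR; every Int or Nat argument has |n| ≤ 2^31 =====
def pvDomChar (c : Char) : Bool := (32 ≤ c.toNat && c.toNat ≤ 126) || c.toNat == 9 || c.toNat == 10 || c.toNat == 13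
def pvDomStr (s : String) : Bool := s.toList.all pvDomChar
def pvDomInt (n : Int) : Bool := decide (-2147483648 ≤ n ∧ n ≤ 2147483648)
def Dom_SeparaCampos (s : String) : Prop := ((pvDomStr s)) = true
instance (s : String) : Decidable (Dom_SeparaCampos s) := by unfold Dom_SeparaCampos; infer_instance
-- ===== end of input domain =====

-- B replaces A's 3-state per-character state machine by a split-on-runs-of-≥2-spaces
-- tokenizer + ','-join + one trailing-space trim (objective: simpler).

-- ===== PORT A =====
-- literal transliteration of A's for-loop over (resposta, estado)
def pvStepA (st : List Char × Int) (letra : Char) : List Char × Int :=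
  let (resposta, estado) := st
  if estado = 0 then
    if letra ≠ ' ' then (resposta ++ [letra], estado)
    else (resposta, 1)
  else if estado = 1 then
    if letra ≠ ' ' then (resposta ++ [' ', letra], 0)
    else (resposta ++ [','], 2)
  else if estado = 2 then
    if letra ≠ ' ' then (resposta ++ [letra], 0)
    else (resposta, estado)
  else (resposta, estado)

def SeparaCampos (s : String) : String :=
  String.mk (s.toList.foldl pvStepA ([], 0)).1

-- ===== PORT B =====
-- tokenizer: cut the string at every run of ≥2 spaces (consuming the whole run)
def pvSplit : List Char → List (List Char)
  | [] => [[]]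
  | ' ' :: ' ' :: r =>
      [] :: pvSplit ((' ' :: r).dropWhile (· = ' '))
  | c :: r =>
      match pvSplit r with
      | [] => [[c]]
      | seg :: segs => (c :: seg) :: segs
termination_by cs => cs.length
decreasing_by
  · calc ((' ' :: r).dropWhile (· = ' ')).length ≤ (' ' :: r).length := List.length_dropWhile_le _ _
      _ < (' ' :: ' ' :: r).length := by simp
  · simp

-- ','.join
def pvJoin : List (List Char) → List Char
  | [] => []
  | [seg] => seg
  | seg :: rest => seg ++ ',' :: pvJoin rest

-- drop a dangling trailing single space (the final `t[:-1] if t.endswith(' ') else t`)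
def pvFix (t : List Char) : List Char := if t.getLast? = some ' ' then t.dropLast else t

def SeparaCampos_alt (s : String) : String :=
  String.mk (pvFix (pvJoin (pvSplit s.toList)))

-- ===== PRECONDITION & SPEC =====
def Spec_SeparaCampos (s : String) (out : String) : Prop := out = SeparaCampos_alt s
instance (s : String) (out : String) : Decidable (Spec_SeparaCampos s out) := by unfold Spec_SeparaCampos; infer_instance

-- ===== CLAIM (what is proved, stated in full; the proofs are below) =====
def Claim_equal_SeparaCampos : Prop := ∀ (s : String), Dom_SeparaCampos s → Spec_SeparaCampos s (SeparaCampos s)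

-- ===== LEMMAS AND PROOFS =====

-- A's output from state st on the remaining input
def pvRunA (st : Int) : List Char → List Char
  | [] => []
  | c :: r =>
    if st = 0 then (if c ≠ ' ' then c :: pvRunA 0 r else pvRunA 1 r)
    else if st = 1 then (if c ≠ ' ' then ' ' :: c :: pvRunA 0 r else ',' :: pvRunA 2 r)
    else if st = 2 then (if c ≠ ' ' then c :: pvRunA 0 r else pvRunA 2 r)
    else pvRunA st r

lemma foldA_eq (cs : List Char) : ∀ (acc : List Char) (st : Int),
    (cs.foldl pvStepA (acc, st)).1 = acc ++ pvRunA st cs := by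
  induction cs with
  | nil => intro acc st; simp [pvRunA]
  | cons c r ih =>
    intro acc st
    simp only [List.foldl_cons, pvStepA, pvRunA]
    split_ifs <;> subst_vars <;> simp [ih]

lemma runA2_eq (cs : List Char) : pvRunA 2 cs = pvRunA 0 (cs.dropWhile (· = ' ')) := by
  induction cs with
  | nil => simp [pvRunA]
  | cons c r ih =>
    by_cases h : c = ' '
    · subst h; simpa [pvRunA, List.dropWhile] using ih
    · simp [pvRunA, List.dropWhile, h]

def pvP (cs : List Char) : List Char := pvJoin (pvSplit cs)

lemma pvSplit_ne_nil (cs : List Char) : pvSplit cs ≠ [] := by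
  unfold pvSplit
  split
  · simp
  · simp
  · split <;> simp

lemma pvJoin_cons (a : List Char) (b : List Char) (t : List (List Char)) :
    pvJoin (a :: b :: t) = a ++ ',' :: pvJoin (b :: t) := rfl

lemma pvP_double (r : List Char) :
    pvP (' ' :: ' ' :: r) = ',' :: pvP ((' ' :: r).dropWhile (· = ' ')) := by
  unfold pvP
  rw [show pvSplit (' ' :: ' ' :: r) = [] :: pvSplit ((' ' :: r).dropWhile (· = ' ')) from by
    rw [pvSplit]]
  rcases hs : pvSplit ((' ' :: r).dropWhile (· = ' ')) with _ | ⟨seg, segs⟩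
  · exact absurd hs (pvSplit_ne_nil _)
  · rw [pvJoin_cons]; rfl

lemma pvP_cons (c : Char) (r : List Char) (h : ¬ (c = ' ' ∧ r.head? = some ' ')) :
    pvP (c :: r) = c :: pvP r := by
  unfold pvP
  have hsplit : pvSplit (c :: r) =
      match pvSplit r with
      | [] => [[c]]
      | seg :: segs => (c :: seg) :: segs := by
    rw [pvSplit.eq_def]
    cases r with
    | nil =>
      by_cases hc : c = ' '
      · subst hc; rfl
      · simp
    | cons c2 r2 =>
      by_cases hc : c = ' ' <;> by_cases hc2 : c2 = ' '
      · exact absurd ⟨hc, by simp [hc2]⟩ h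
      · subst hc; simp [hc2]
      · subst hc2; simp [hc]
      · simp [hc, hc2]
  rw [hsplit]
  rcases hs : pvSplit r with _ | ⟨seg, segs⟩
  · exact absurd hs (pvSplit_ne_nil r)
  · cases segs with
    | nil => rfl
    | cons b t => rw [pvJoin_cons, pvJoin_cons]; simp

-- strong-induction core: B's pre-trim string equals A's run, up to one dangling
-- trailing space, and A's run never ends in a space
lemma core (n : Nat) : ∀ cs : List Char, cs.length ≤ n →
    (pvP cs = pvRunA 0 cs ∨ pvP cs = pvRunA 0 cs ++ [' ']) ∧
    (pvRunA 0 cs).getLast? ≠ some ' ' := by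
  induction n with
  | zero =>
    intro cs h
    have : cs = [] := List.eq_nil_of_length_eq_zero (Nat.le_zero.mp h)
    subst this
    simp [pvP, pvSplit, pvJoin, pvRunA]
  | succ n ih =>
    intro cs hlen
    match cs with
    | [] => simp [pvP, pvSplit, pvJoin, pvRunA]
    | c :: r =>
      by_cases hc : c = ' '
      · subst hc
        cases r with
        | nil =>
          constructor
          · right; simp [pvP, pvSplit, pvJoin, pvRunA]
          · simp [pvRunA]
        | cons c2 r2 =>
          by_cases hc2 : c2 = ' '
          · -- run of ≥ 2 spaces
            subst hc2
            have hdw : ((' ' :: r2).dropWhile (· = ' ')).length ≤ n := by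
              have := List.length_dropWhile_le (fun c => c = ' ') (' ' :: r2)
              simp at hlen this ⊢
              omega
            obtain ⟨hP, hL⟩ := ih _ hdw
            have hrun : pvRunA 0 (' ' :: ' ' :: r2) =
                ',' :: pvRunA 0 ((' ' :: r2).dropWhile (· = ' ')) := by
              have h2 : pvRunA 2 r2 = pvRunA 0 (r2.dropWhile (· = ' ')) := runA2_eq r2
              simp [pvRunA, h2, List.dropWhile]
            constructor
            · rw [pvP_double, hrun]
              rcases hP with h | h
              · left; rw [h]
              · right; rw [h]; simp
            · rw [hrun]
              rcases he : pvRunA 0 ((' ' :: r2).dropWhile (· = ' ')) with _ | ⟨x, xs⟩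
              · simp
              · rw [List.getLast?_cons_cons]; rw [he] at hL; exact hL
          · -- single space followed by a non-space
            have hnd : ¬ (' ' = ' ' ∧ (c2 :: r2).head? = some ' ') := by
              intro ⟨_, hr⟩; simp at hr; exact hc2 hr
            obtain ⟨hP, hL⟩ := ih (c2 :: r2) (by simp at hlen ⊢; omega)
            have hrun : pvRunA 0 (' ' :: c2 :: r2) = ' ' :: pvRunA 0 (c2 :: r2) := by
              simp [pvRunA, hc2]
            constructor
            · rw [pvP_cons _ _ hnd, hrun]
              rcases hP with h | h
              · left; rw [h]
              · right; rw [h]; simp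
            · rw [hrun]
              have hne2 : pvRunA 0 (c2 :: r2) ≠ [] := by simp [pvRunA, hc2]
              rcases he : pvRunA 0 (c2 :: r2) with _ | ⟨x, xs⟩
              · exact absurd he hne2
              · rw [List.getLast?_cons_cons]; rw [he] at hL; exact hL
      · -- non-space head
        have hnd : ¬ (c = ' ' ∧ r.head? = some ' ') := fun ⟨h1, _⟩ => hc h1
        obtain ⟨hP, hL⟩ := ih r (by simp at hlen; omega)
        have hrun : pvRunA 0 (c :: r) = c :: pvRunA 0 r := by simp [pvRunA, hc]
        constructor
        · rw [pvP_cons _ _ hnd, hrun]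
          rcases hP with h | h
          · left; rw [h]
          · right; rw [h]; simp
        · rw [hrun]
          rcases he : pvRunA 0 r with _ | ⟨x, xs⟩
          · simpa using hc
          · rw [List.getLast?_cons_cons]; rw [he] at hL; exact hL

-- ===== VERDICT (by name: the statement is the Claim_ definition above) =====
theorem SeparaCampos_spec : Claim_equal_SeparaCampos := by
  intro s _
  unfold Spec_SeparaCampos SeparaCampos SeparaCampos_alt
  rw [foldA_eq]
  obtain ⟨hP, hL⟩ := core s.toList.length s.toList le_rfl
  have hPP : pvJoin (pvSplit s.toList) = pvP s.toList := rfl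
  rcases hP with h | h
  · rw [hPP, h]; unfold pvFix; rw [if_neg hL]; simp
  · rw [hPP, h]; unfold pvFix; simp
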